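-- pv_equiv track=rewrite | github.com/TheSmartDevs/SmartToolBot | modules/ccxutils/db.py | process_bins_to_json
-- ===== SOURCE A (Python) =====
-- def process_bins_to_json(bins):
--     processed = []
--     for bin_data in bins:
--         processed.append({
--             "bin": bin_data.get("bin", "Unknown"),
--             "bank": bin_data.get("issuer", "Unknown"),
--             "country_code": bin_data.get("country_code", "Unknown"),
--             "brand": bin_data.get("brand", "Unknown"),
--             "category": bin_data.get("category", "Unknown"),
--             "type": bin_data.get("type", "Unknown"),
--             "website": bin_data.get("website", "")
--         })
--     return processed
-- ===== SOURCE B (Python) =====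
-- FIELDS = [
--     ("bin", "bin", "Unknown"),
--     ("bank", "issuer", "Unknown"),
--     ("country_code", "country_code", "Unknown"),
--     ("brand", "brand", "Unknown"),
--     ("category", "category", "Unknown"),
--     ("type", "type", "Unknown"),
--     ("website", "website", ""),
-- ]
--
-- def process_bins_to_json(bins):
--     # Columnar: one full pass over bins per field, producing seven parallel
--     # columns of (key, value) pairs; then transpose with zip and rebuild rows.
--     columns = [[(out, b.get(src, dflt)) for b in bins] for out, src, dflt in FIELDS]
--     return [dict(row) for row in zip(*columns)]
-- ===== Notes on version B (the rewrite author's own statement) =====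
-- stated objective: alternative
-- what changed: Replaces A's single row-wise pass appending a literal seven-field dict per item by a columnar algorithm: seven staged passes over bins build per-field columns of (key,value) pairs, which are then transposed with zip and rebuilt into row dicts.
import Mathlib
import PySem

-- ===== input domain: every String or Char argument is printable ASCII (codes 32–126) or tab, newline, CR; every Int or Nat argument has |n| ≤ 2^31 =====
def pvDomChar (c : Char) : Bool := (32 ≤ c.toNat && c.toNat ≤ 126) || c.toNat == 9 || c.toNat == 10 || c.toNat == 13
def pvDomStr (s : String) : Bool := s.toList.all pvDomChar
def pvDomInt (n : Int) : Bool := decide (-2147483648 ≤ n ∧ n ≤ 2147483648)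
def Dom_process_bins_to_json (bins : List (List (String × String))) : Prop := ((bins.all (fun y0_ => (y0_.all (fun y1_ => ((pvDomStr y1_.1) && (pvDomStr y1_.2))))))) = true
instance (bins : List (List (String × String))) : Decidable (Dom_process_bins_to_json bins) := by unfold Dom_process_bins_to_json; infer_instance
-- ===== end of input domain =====

-- B replaces A's row-wise append loop by a columnar algorithm: seven staged passes
-- build per-field columns, transposed with zip into row dicts (alternative; same cost).


-- dict.get(k, d) on an insertion-ordered association list: first match, else the default
def pvDictGet (d : List (String × String)) (k : String) (dflt : String) : String :=
  ((d.lookup k).getD dflt)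

-- ===== PORT A =====
def process_bins_to_json (bins : List (List (String × String))) : List (List (String × String)) :=
  bins.foldl (fun processed bin_data =>
    processed ++ [[
      ("bin", pvDictGet bin_data "bin" "Unknown"),
      ("bank", pvDictGet bin_data "issuer" "Unknown"),
      ("country_code", pvDictGet bin_data "country_code" "Unknown"),
      ("brand", pvDictGet bin_data "brand" "Unknown"),
      ("category", pvDictGet bin_data "category" "Unknown"),
      ("type", pvDictGet bin_data "type" "Unknown"),
      ("website", pvDictGet bin_data "website" "")]]) []

-- ===== PORT B =====
def pvFIELDS : List (String × String × String) :=
  [("bin", "bin", "Unknown"), ("bank", "issuer", "Unknown"),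
   ("country_code", "country_code", "Unknown"), ("brand", "brand", "Unknown"),
   ("category", "category", "Unknown"), ("type", "type", "Unknown"),
   ("website", "website", "")]

-- Python's zip(*cols): rows of parallel heads, stopping at the shortest column.
-- The fuel (first column's length) only bounds the recursion; the mapM head? test stops it.
def pvZipStarAux {α : Type} : Nat → List (List α) → List (List α)
  | 0, _ => []
  | n + 1, cols =>
    match cols.mapM List.head? with
    | none => []
    | some heads => heads :: pvZipStarAux n (cols.map List.tail)

def pvZipStar {α : Type} (cols : List (List α)) : List (List α) :=
  pvZipStarAux ((cols.head?.getD []).length) cols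

def process_bins_to_json_alt (bins : List (List (String × String))) : List (List (String × String)) :=
  let columns := pvFIELDS.map (fun f => bins.map (fun b => (f.1, pvDictGet b f.2.1 f.2.2)))
  (pvZipStar columns).map (fun row => (PySem.Dict.ofList row).items)

-- ===== PRECONDITION & SPEC =====
def Spec_process_bins_to_json (bins : List (List (String × String))) (out : List (List (String × String))) : Prop := out = process_bins_to_json_alt bins
instance (bins : List (List (String × String))) (out : List (List (String × String))) : Decidable (Spec_process_bins_to_json bins out) := by unfold Spec_process_bins_to_json; infer_instance

-- ===== CLAIM =====
def Claim_equal_process_bins_to_json : Prop := ∀ (bins : List (List (String × String))), Dom_process_bins_to_json bins → Spec_process_bins_to_json bins (process_bins_to_json bins)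

-- ===== LEMMAS AND PROOFS =====

-- heads of a list of cons columns
theorem pv_mapM_head_cons {α β : Type} (F : List β) (a : β → α) (l : β → List α) :
    (F.map (fun f => a f :: l f)).mapM List.head? = some (F.map a) := by
  induction F with
  | nil => rfl
  | cons f F ih => simp [List.mapM_cons, ih]

-- zip(*columns) of columns that are all maps of the same list is the transposed map
theorem pv_zipStarAux_map {α β γ : Type} (F : List β) (g : β → γ → α) :
    ∀ (xs : List γ),
      pvZipStarAux xs.length (F.map (fun f => xs.map (g f)))
        = xs.map (fun x => F.map (fun f => g f x)) := by
  intro xs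
  induction xs with
  | nil => rfl
  | cons x xs ih =>
    show pvZipStarAux (xs.length + 1) _ = _
    rw [pvZipStarAux]
    have hcols : F.map (fun f => (x :: xs).map (g f))
        = F.map (fun f => g f x :: xs.map (g f)) := by simp
    rw [hcols, pv_mapM_head_cons F (fun f => g f x) (fun f => xs.map (g f))]
    simp only []
    have htails : (F.map (fun f => g f x :: xs.map (g f))).map List.tail
        = F.map (fun f => xs.map (g f)) := by simp [List.map_map]
    rw [htails, ih]
    simp

-- dict(row) on a 7-pair row with these distinct literal keys is the row itself
theorem pv_row_dict (v1 v2 v3 v4 v5 v6 v7 : String) :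
    (PySem.Dict.ofList [("bin", v1), ("bank", v2), ("country_code", v3), ("brand", v4),
        ("category", v5), ("type", v6), ("website", v7)]).items
      = [("bin", v1), ("bank", v2), ("country_code", v3), ("brand", v4),
        ("category", v5), ("type", v6), ("website", v7)] := by
  rfl

-- ===== VERDICT =====
theorem process_bins_to_json_spec : Claim_equal_process_bins_to_json := by
  intro bins _
  show process_bins_to_json bins = process_bins_to_json_alt bins
  rw [process_bins_to_json, process_bins_to_json_alt,
    PySem.List.foldl_append_singleton_eq_map]
  show _ = (pvZipStar (pvFIELDS.map (fun f => bins.map (fun b => (f.1, pvDictGet b f.2.1 f.2.2))))).map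
      (fun row => (PySem.Dict.ofList row).items)
  have hlen : ((pvFIELDS.map (fun f => bins.map (fun b => (f.1, pvDictGet b f.2.1 f.2.2)))).head?.getD []).length
      = bins.length := by simp [pvFIELDS]
  rw [pvZipStar, hlen,
    pv_zipStarAux_map pvFIELDS (fun f b => (f.1, pvDictGet b f.2.1 f.2.2)) bins,
    List.map_map]
  apply List.map_congr_left
  intro b _
  show _ = (PySem.Dict.ofList (pvFIELDS.map (fun f => (f.1, pvDictGet b f.2.1 f.2.2)))).items
  rw [show pvFIELDS.map (fun f => (f.1, pvDictGet b f.2.1 f.2.2))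
      = [("bin", pvDictGet b "bin" "Unknown"), ("bank", pvDictGet b "issuer" "Unknown"),
         ("country_code", pvDictGet b "country_code" "Unknown"), ("brand", pvDictGet b "brand" "Unknown"),
         ("category", pvDictGet b "category" "Unknown"), ("type", pvDictGet b "type" "Unknown"),
         ("website", pvDictGet b "website" "")] from rfl,
    pv_row_dict]
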